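-- pv_equiv track=rewrite | github.com/JKay15/LOOP | loop_product/endpoint/policy.py | _classify_clauses
-- ===== SOURCE A (Python) =====
-- def _normalize_text(text: object) -> str:
--     return " ".join(str(text or "").split()).strip()
--
-- def _split_clauses(text: object) -> list[str]:
--     out: list[str] = []
--     current: list[str] = []
--     for ch in str(text or ""):
--         if ch in ".!?;\n":
--             clause = _normalize_text("".join(current).strip(" -,/\t\r\n"))
--             if clause:
--                 out.append(clause)
--             current = []
--             continue
--         current.append(" " if ch.isspace() else ch)
--     tail = _normalize_text("".join(current).strip(" -,/\t\r\n"))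
--     if tail:
--         out.append(tail)
--     return out
--
-- def _dedupe_texts(items: list[str]) -> list[str]:
--     out: list[str] = []
--     seen: set[str] = set()
--     for item in items:
--         text = _normalize_text(item)
--         key = text.casefold()
--         if not text or key in seen:
--             continue
--         seen.add(key)
--         out.append(text)
--     return out
--
-- def _classify_clauses(text: object) -> tuple[list[str], list[str]]:
--     confirmed: list[str] = []
--     denied: list[str] = []
--     for clause in _split_clauses(text):
--         lowered = clause.casefold()
--         if any(
--             marker in lowered
--             for marker in (
--                 "do not",
--                 "don't",
--                 "dont",
--                 "must not",
--                 "should not",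
--                 "would be wrong",
--                 "wrong if",
--                 "unacceptable",
--                 "too heavy",
--                 "feels wrong",
--                 "not want",
--                 "no ",
--                 "without ",
--             )
--         ):
--             denied.append(clause)
--         else:
--             confirmed.append(clause)
--     return _dedupe_texts(confirmed), _dedupe_texts(denied)
-- ===== SOURCE B (Python) =====
-- _STRIP = " -,/\t\r\n"
-- _MARKERS = (
--     "do not", "don't", "dont", "must not", "should not", "would be wrong",
--     "wrong if", "unacceptable", "too heavy", "feels wrong", "not want",
--     "no ", "without ",
-- )
--
-- def _classify_clauses(text):
--     s = str(text or "")
--     for d in ".!?;":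
--         s = s.replace(d, "\n")
--     confirmed, denied = [], []
--     seen_confirmed, seen_denied = set(), set()
--     for seg in s.split("\n"):
--         clause = " ".join(seg.strip(_STRIP).split())
--         if not clause:
--             continue
--         key = clause.casefold()
--         if any(m in key for m in _MARKERS):
--             if key not in seen_denied:
--                 seen_denied.add(key)
--                 denied.append(clause)
--         elif key not in seen_confirmed:
--             seen_confirmed.add(key)
--             confirmed.append(clause)
--     return confirmed, denied
-- ===== Notes on version B (the rewrite author's own statement) =====
-- stated objective: faster
-- what changed: Replaces the per-character split state machine (accumulating whitespace-canonicalised chars and flushing on delimiters) by replacing each delimiter with a newline and splitting once, and fuses the classify pass plus the two separate dedupe passes into a single loop that classifies and dedupes each clause as it is produced.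
import Mathlib
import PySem

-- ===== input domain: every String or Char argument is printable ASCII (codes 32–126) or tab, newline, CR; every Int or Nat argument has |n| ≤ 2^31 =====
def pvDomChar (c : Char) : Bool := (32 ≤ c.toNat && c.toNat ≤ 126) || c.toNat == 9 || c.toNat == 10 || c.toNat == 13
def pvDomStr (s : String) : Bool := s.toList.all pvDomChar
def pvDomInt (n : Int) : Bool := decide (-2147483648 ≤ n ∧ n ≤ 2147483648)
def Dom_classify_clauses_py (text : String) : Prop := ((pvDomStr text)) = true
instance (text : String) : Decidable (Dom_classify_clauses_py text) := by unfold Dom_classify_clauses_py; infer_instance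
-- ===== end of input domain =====

-- B replaces A's per-character split state machine by replace-delimiters-then-split-once and fuses
-- the classify pass and the two dedupe passes into one loop (objective: faster by a constant factor,
-- measured in a timing run; same asymptotic cost).
-- Both ports render Python's str.casefold as PySem.Str.lower, which is exact on the ASCII domain.

-- ===== PORT A =====
-- " ".join(str(text or "").split()).strip()   (str(text or "") is the identity on str inputs)
def normalize_text_py (text : String) : String :=
  PySem.Str.strip (PySem.Str.join " " (PySem.Str.split₀ text))

-- the per-character state machine of _split_clauses; st = (out, current)
def split_clauses_step (st : List String × List Char) (ch : Char) : List String × List Char :=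
  if (".!?;\n".toList).contains ch then  -- ch in ".!?;\n"
    let clause := normalize_text_py (PySem.Str.stripChars (String.ofList st.2) " -,/\t\r\n")
    (if clause ≠ "" then st.1 ++ [clause] else st.1, [])
  else
    (st.1, st.2 ++ [if PySem.Chars.isspace ch then ' ' else ch])

def split_clauses_py (text : String) : List String :=
  let fin := text.toList.foldl split_clauses_step ([], [])
  let tail := normalize_text_py (PySem.Str.stripChars (String.ofList fin.2) " -,/\t\r\n")
  if tail ≠ "" then fin.1 ++ [tail] else fin.1

def dedupe_texts_py (items : List String) : List String :=
  (items.foldl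
    (fun (st : List String × PySem.Set String) item =>
      let text := normalize_text_py item
      let key := PySem.Str.lower text          -- .casefold(): = lower on ASCII
      if text = "" ∨ PySem.Set.contains st.2 key then st
      else (st.1 ++ [text], PySem.Set.add st.2 key))
    ([], PySem.Set.empty)).1

def markers_py : List String :=
  ["do not", "don't", "dont", "must not", "should not", "would be wrong",
   "wrong if", "unacceptable", "too heavy", "feels wrong", "not want",
   "no ", "without "]

def classify_clauses_py (text : String) : List String × List String :=
  let fin := (split_clauses_py text).foldl
    (fun (st : List String × List String) clause =>
      let lowered := PySem.Str.lower clause    -- .casefold(): = lower on ASCII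
      if markers_py.any (fun m => PySem.Str.isIn m lowered) then
        (st.1, st.2 ++ [clause])
      else
        (st.1 ++ [clause], st.2))
    ([], [])
  (dedupe_texts_py fin.1, dedupe_texts_py fin.2)

-- ===== PORT B =====
def markers_py_alt : List String :=
  ["do not", "don't", "dont", "must not", "should not", "would be wrong",
   "wrong if", "unacceptable", "too heavy", "feels wrong", "not want",
   "no ", "without "]

-- one fused loop; st = (confirmed, denied, seen_confirmed, seen_denied)
def classify_step_alt (st : List String × List String × PySem.Set String × PySem.Set String)
    (seg : String) : List String × List String × PySem.Set String × PySem.Set String :=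
  let clause := PySem.Str.join " " (PySem.Str.split₀ (PySem.Str.stripChars seg " -,/\t\r\n"))
  if clause = "" then st
  else
    let key := PySem.Str.lower clause          -- .casefold(): = lower on ASCII
    if markers_py_alt.any (fun m => PySem.Str.isIn m key) then
      if PySem.Set.contains st.2.2.2 key then st
      else (st.1, st.2.1 ++ [clause], st.2.2.1, PySem.Set.add st.2.2.2 key)
    else
      if PySem.Set.contains st.2.2.1 key then st
      else (st.1 ++ [clause], st.2.1, PySem.Set.add st.2.2.1 key, st.2.2.2)

def classify_clauses_py_alt (text : String) : List String × List String :=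
  -- for d in ".!?;": s = s.replace(d, "\n")
  let s := (".!?;".toList).foldl
    (fun s d => PySem.Str.replace s (String.ofList [d]) "\n") text
  -- s.split("\n"): the separator is nonempty, so split? is always `some`
  let segments := (PySem.Str.split? s "\n").getD []
  let fin := segments.foldl classify_step_alt ([], [], PySem.Set.empty, PySem.Set.empty)
  (fin.1, fin.2.1)

-- ===== PRECONDITION & SPEC =====
def Spec_classify_clauses_py (text : String) (out : List String × List String) : Prop := out = classify_clauses_py_alt text
instance (text : String) (out : List String × List String) : Decidable (Spec_classify_clauses_py text out) := by unfold Spec_classify_clauses_py; infer_instance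

-- ===== CLAIM (what is proved, stated in full; the proofs are below) =====
def Claim_equal_classify_clauses_py : Prop := ∀ (text : String), Dom_classify_clauses_py text → Spec_classify_clauses_py text (classify_clauses_py text)

-- ===== LEMMAS AND PROOFS =====

theorem char_eq_of_toNat {c d : Char} (h : c.toNat = d.toNat) : c = d := by
  apply Char.ext
  apply UInt32.toNat_inj.mp h

-- ---- words spec for Python str.split() (mirrors PySem.Chars.split₀.go) ----
def Hs : List Char → List Char → List (List Char)
  | cur, [] => if cur.isEmpty then [] else [cur.reverse]
  | cur, c :: r =>
    if PySem.Chars.isspace c then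
      (if cur.isEmpty then Hs [] r else cur.reverse :: Hs [] r)
    else Hs (c :: cur) r

theorem go_eq_Hs (cs : List Char) : ∀ cur acc,
    PySem.Chars.split₀.go cs cur acc = acc.reverse ++ Hs cur cs := by
  induction cs with
  | nil =>
    intro cur acc
    rw [PySem.Chars.split₀.go, Hs]
    by_cases h : cur.isEmpty <;> simp [h]
  | cons c r ih =>
    intro cur acc
    rw [PySem.Chars.split₀.go, Hs]
    by_cases hs : PySem.Chars.isspace c <;> by_cases hc : cur.isEmpty <;>
      simp [hs, hc, ih]

theorem split₀_eq_Hs (cs : List Char) : PySem.Chars.split₀ cs = Hs [] cs := by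
  rw [PySem.Chars.split₀, go_eq_Hs]; rfl

def goodWord (w : List Char) : Prop := w ≠ [] ∧ ∀ c ∈ w, PySem.Chars.isspace c = false

theorem Hs_good (cs : List Char) : ∀ cur, (∀ c ∈ cur, PySem.Chars.isspace c = false) →
    ∀ w ∈ Hs cur cs, goodWord w := by
  induction cs with
  | nil =>
    intro cur hcur w hw
    rw [Hs] at hw
    by_cases hc : cur.isEmpty
    · simp [hc] at hw
    · simp [hc] at hw
      subst hw
      refine ⟨by simpa [List.isEmpty_iff] using hc, ?_⟩
      intro c hc'; exact hcur c (List.mem_reverse.mp hc')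
  | cons c r ih =>
    intro cur hcur w hw
    rw [Hs] at hw
    by_cases hs : PySem.Chars.isspace c
    · by_cases hc : cur.isEmpty
      · simp [hs, hc] at hw
        exact ih [] (by simp) w hw
      · simp [hs, hc] at hw
        rcases hw with hw | hw
        · subst hw
          refine ⟨by simpa [List.isEmpty_iff] using hc, ?_⟩
          intro d hd; exact hcur d (List.mem_reverse.mp hd)
        · exact ih [] (by simp) w hw
    · simp [hs] at hw
      refine ih (c :: cur) ?_ w hw
      intro d hd
      rcases List.mem_cons.mp hd with h | h
      · subst h; simpa using hs
      · exact hcur d h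

theorem good_split₀ (x : List Char) : ∀ w ∈ PySem.Chars.split₀ x, goodWord w := by
  rw [split₀_eq_Hs]
  exact Hs_good x [] (by simp)

theorem Hs_append_word (w : List Char) : ∀ cur cs, (∀ c ∈ w, PySem.Chars.isspace c = false) →
    Hs cur (w ++ cs) = Hs (w.reverse ++ cur) cs := by
  induction w with
  | nil => intro cur cs _; simp
  | cons c w' ih =>
    intro cur cs hw
    have hc : PySem.Chars.isspace c = false := hw c (by simp)
    rw [List.cons_append, Hs]
    simp [hc]
    rw [ih (c :: cur) cs (fun d hd => hw d (by simp [hd]))]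

theorem Hs_join (ws : List (List Char)) (h : ∀ w ∈ ws, goodWord w) :
    Hs [] (PySem.Chars.join [' '] ws) = ws := by
  induction ws with
  | nil => simp [PySem.Chars.join, List.intercalate, Hs]
  | cons w ws' ih =>
    rcases h w (by simp) with ⟨hne, hns⟩
    cases ws' with
    | nil =>
      have : PySem.Chars.join [' '] [w] = w := by
        simp [PySem.Chars.join, List.intercalate]
      rw [this, ← List.append_nil w, Hs_append_word w [] [] hns, Hs]
      simp [List.isEmpty_iff, hne]
    | cons v vs =>
      have hjoin : PySem.Chars.join [' '] (w :: v :: vs) = w ++ ' ' :: PySem.Chars.join [' '] (v :: vs) := by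
        simp [PySem.Chars.join, List.intercalate, List.intersperse]
      rw [hjoin, Hs_append_word w _ _ hns, Hs]
      have hsp : PySem.Chars.isspace ' ' = true := by decide
      simp [hsp, List.isEmpty_iff, hne]
      exact ih (fun u hu => h u (by simp [hu]))

-- ---- whitespace canonicalisation (A's " " if ch.isspace() else ch) ----
def spC (c : Char) : Char := if PySem.Chars.isspace c then ' ' else c

theorem isspace_spC (c : Char) : PySem.Chars.isspace (spC c) = PySem.Chars.isspace c := by
  unfold spC
  by_cases h : PySem.Chars.isspace c <;> simp [h]
  decide

theorem Hs_map_spC (cs : List Char) : ∀ cur, Hs cur (cs.map spC) = Hs cur cs := by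
  induction cs with
  | nil => intro cur; simp
  | cons c r ih =>
    intro cur
    rw [List.map_cons, Hs, Hs, isspace_spC]
    by_cases hs : PySem.Chars.isspace c
    · simp [hs, ih]
    · have : spC c = c := by simp [spC, hs]
      simp [hs, this, ih]

-- ---- the strip character set " -,/\t\r\n" ----
def stripset : List Char := [' ', '-', ',', '/', '\t', '\r', '\n']

theorem dom_space_mem_stripset (c : Char) (hd : pvDomChar c = true)
    (hs : PySem.Chars.isspace c = true) : stripset.contains c = true := by
  have h9 : c.toNat = 9 ∨ c.toNat = 10 ∨ c.toNat = 13 ∨ c.toNat = 32 := by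
    simp [pvDomChar] at hd
    simp [PySem.Chars.isspace] at hs
    omega
  have h4 : c = '\t' ∨ c = '\n' ∨ c = '\r' ∨ c = ' ' := by
    rcases h9 with h | h | h | h
    · exact Or.inl (char_eq_of_toNat h)
    · exact Or.inr (Or.inl (char_eq_of_toNat h))
    · exact Or.inr (Or.inr (Or.inl (char_eq_of_toNat h)))
    · exact Or.inr (Or.inr (Or.inr (char_eq_of_toNat h)))
  rcases h4 with h | h | h | h <;> subst h <;> decide

theorem stripset_spC (c : Char) (hd : pvDomChar c = true) :
    stripset.contains (spC c) = stripset.contains c := by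
  by_cases hs : PySem.Chars.isspace c
  · have h1 := dom_space_mem_stripset c hd hs
    simp only [List.contains_iff_mem] at h1 ⊢
    have h2 : ' ' ∈ stripset := by decide
    simp [spC, hs, h1, h2]
  · simp [spC, hs]

theorem dropWhile_congr' {α : Type} {p q : α → Bool} (l : List α)
    (h : ∀ c ∈ l, p c = q c) : l.dropWhile p = l.dropWhile q := by
  induction l with
  | nil => rfl
  | cons a l ih =>
    simp only [List.dropWhile_cons]
    rw [h a (by simp)]
    split
    · exact ih (fun c hc => h c (by simp [hc]))
    · rfl

theorem stripChars_map_spC (g : List Char) (hd : ∀ c ∈ g, pvDomChar c = true) :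
    PySem.Chars.stripChars (g.map spC) stripset = (PySem.Chars.stripChars g stripset).map spC := by
  unfold PySem.Chars.stripChars
  have hdw : ∀ (l : List Char), (∀ c ∈ l, pvDomChar c = true) →
      List.dropWhile (fun c => stripset.contains c) (l.map spC)
        = (List.dropWhile (fun c => stripset.contains c) l).map spC := by
    intro l hl
    rw [List.dropWhile_map]
    congr 1
    apply dropWhile_congr'
    intro c hc
    exact stripset_spC c (hl c hc)
  simp only []
  rw [hdw g hd, ← List.map_reverse, hdw _ (by
    intro c hc
    exact hd c (List.dropWhile_subset _ (List.mem_reverse.mp hc))), List.map_reverse]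

-- ---- stripping is a no-op on " "-joined words ----
theorem getLast?_cons_ne_nil {α : Type} (c : α) (l : List α) (h : l ≠ []) :
    (c :: l).getLast? = l.getLast? := by
  cases l with
  | nil => exact absurd rfl h
  | cons a t => simp [List.getLast?_cons_cons]

theorem join_good_cons (w : List Char) (ws : List (List Char)) :
    ∃ t, PySem.Chars.join [' '] (w :: ws) = w ++ t := by
  cases ws with
  | nil => exact ⟨[], by simp [PySem.Chars.join, List.intercalate]⟩
  | cons v vs =>
    exact ⟨' ' :: PySem.Chars.join [' '] (v :: vs),
      by simp [PySem.Chars.join, List.intercalate, List.intersperse]⟩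

theorem getLast?_join_good (ws : List (List Char)) (h : ∀ w ∈ ws, goodWord w) :
    ∀ c, (PySem.Chars.join [' '] ws).getLast? = some c → PySem.Chars.isspace c = false := by
  induction ws with
  | nil => intro c hc; simp [PySem.Chars.join, List.intercalate] at hc
  | cons w ws ih =>
    intro c hc
    cases ws with
    | nil =>
      have hj : PySem.Chars.join [' '] [w] = w := by simp [PySem.Chars.join, List.intercalate]
      rw [hj] at hc
      exact (h w (by simp)).2 c (List.mem_of_getLast? hc)
    | cons v vs =>
      have hj : PySem.Chars.join [' '] (w :: v :: vs) = w ++ ' ' :: PySem.Chars.join [' '] (v :: vs) := by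
        simp [PySem.Chars.join, List.intercalate, List.intersperse]
      have hne : PySem.Chars.join [' '] (v :: vs) ≠ [] := by
        obtain ⟨t, ht⟩ := join_good_cons v vs
        rw [ht]
        have := (h v (by simp)).1
        simp [this]
      rw [hj, List.getLast?_append, getLast?_cons_ne_nil _ _ hne] at hc
      cases heq : (PySem.Chars.join [' '] (v :: vs)).getLast? with
      | none => exact absurd (List.getLast?_eq_none_iff.mp heq) hne
      | some d =>
        rw [heq] at hc
        simp [Option.or] at hc
        subst hc
        exact ih (fun u hu => h u (by simp [hu])) d heq

theorem strip_join_good (ws : List (List Char)) (h : ∀ w ∈ ws, goodWord w) :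
    PySem.Chars.strip (PySem.Chars.join [' '] ws) = PySem.Chars.join [' '] ws := by
  unfold PySem.Chars.strip PySem.Chars.lstrip PySem.Chars.rstrip
  have hl : List.dropWhile PySem.Chars.isspace (PySem.Chars.join [' '] ws)
      = PySem.Chars.join [' '] ws := by
    cases ws with
    | nil => simp [PySem.Chars.join, List.intercalate]
    | cons w ws' =>
      obtain ⟨t, ht⟩ := join_good_cons w ws'
      rcases h w (by simp) with ⟨hne, hns⟩
      cases w with
      | nil => exact absurd rfl hne
      | cons c w'' =>
        rw [ht, List.cons_append, List.dropWhile_cons]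
        simp [hns c (by simp)]
  rw [hl]
  have hr : List.dropWhile PySem.Chars.isspace (PySem.Chars.join [' '] ws).reverse
      = (PySem.Chars.join [' '] ws).reverse := by
    cases hrev : (PySem.Chars.join [' '] ws).reverse with
    | nil => rfl
    | cons c t =>
      have : (PySem.Chars.join [' '] ws).getLast? = some c := by
        rw [← List.head?_reverse, hrev]; rfl
      rw [List.dropWhile_cons]
      simp [getLast?_join_good ws h c this]
  rw [hr, List.reverse_reverse]

-- ---- single-character replace and split on '\n' ----
theorem replace_go_single (d e : Char) :
    ∀ (fuel : Nat) (l acc : List Char), l.length ≤ fuel →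
      PySem.Chars.replace.go [d] [e] fuel l acc
        = acc.reverse ++ l.map (fun c => if c = d then e else c) := by
  intro fuel
  induction fuel with
  | zero =>
    intro l acc h
    have : l = [] := List.length_eq_zero_iff.mp (Nat.le_zero.mp h)
    subst this
    rw [PySem.Chars.replace.go]
    simp
  | succ n ih =>
    intro l acc h
    cases l with
    | nil =>
      rw [PySem.Chars.replace.go]
      · simp
      · omega
    | cons c t =>
      rw [PySem.Chars.replace.go]
      by_cases hc : c = d
      · have hp : [d].isPrefixOf (c :: t) = true := by simp [List.isPrefixOf, hc]
        rw [if_pos hp]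
        have := ih t (e :: acc) (by simpa using Nat.le_of_succ_le_succ h)
        simpa [hc] using this
      · have hp : [d].isPrefixOf (c :: t) = false := by
          simp [List.isPrefixOf]
          exact fun hh => absurd hh.symm hc
        rw [if_neg (by simp [hp])]
        have := ih t (c :: acc) (by simpa using Nat.le_of_succ_le_succ h)
        simpa [hc] using this

theorem replace_single (d e : Char) (l : List Char) :
    PySem.Chars.replace l [d] [e] = l.map (fun c => if c = d then e else c) := by
  rw [PySem.Chars.replace]
  simp [replace_go_single d e l.length l [] le_rfl]

def consH (c : Char) : List (List Char) → List (List Char)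
  | [] => [[c]]
  | s :: ss => (c :: s) :: ss

def consH' (w : List Char) : List (List Char) → List (List Char)
  | [] => [w]
  | s :: ss => (w ++ s) :: ss

def nlSegs : List Char → List (List Char)
  | [] => [[]]
  | c :: r => if c = '\n' then [] :: nlSegs r else consH c (nlSegs r)

theorem nlSegs_ne_nil (l : List Char) : nlSegs l ≠ [] := by
  cases l with
  | nil => simp [nlSegs]
  | cons c r =>
    rw [nlSegs]
    split
    · simp
    · cases h : nlSegs r with
      | nil => simp [consH]
      | cons s ss => simp [consH]

theorem consH'_nil_of_ne (l : List (List Char)) (h : l ≠ []) : consH' [] l = l := by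
  cases l with
  | nil => exact absurd rfl h
  | cons s ss => simp [consH']

theorem consH'_consH (w : List Char) (c : Char) (l : List (List Char)) :
    consH' w (consH c l) = consH' (w ++ [c]) l := by
  cases l <;> simp [consH, consH']

theorem splitOn_go_nl :
    ∀ (fuel : Nat) (l cur : List Char) (acc : List (List Char)), l.length < fuel →
      PySem.Chars.splitOn.go ['\n'] fuel l cur acc
        = acc.reverse ++ consH' cur.reverse (nlSegs l) := by
  intro fuel
  induction fuel with
  | zero => intro l cur acc h; omega
  | succ n ih =>
    intro l cur acc h
    cases l with
    | nil =>
      rw [PySem.Chars.splitOn.go]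
      · simp [nlSegs, consH']
      · omega
    | cons c t =>
      rw [PySem.Chars.splitOn.go]
      by_cases hc : c = '\n'
      · have hp : ['\n'].isPrefixOf (c :: t) = true := by simp [List.isPrefixOf, hc]
        rw [if_pos hp]
        have := ih t [] (cur.reverse :: acc) (by simpa using Nat.lt_of_succ_lt_succ h)
        rw [show List.drop ['\n'].length (c :: t) = t by simp, this]
        simp only [List.reverse_nil]
        rw [consH'_nil_of_ne _ (nlSegs_ne_nil t)]
        simp [nlSegs, hc, consH']
      · have hp : ['\n'].isPrefixOf (c :: t) = false := by
          simp [List.isPrefixOf]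
          exact fun hh => absurd hh.symm hc
        rw [if_neg (by simp [hp])]
        have := ih t (c :: cur) acc (by simpa using Nat.lt_of_succ_lt_succ h)
        rw [this]
        simp [nlSegs, hc, consH'_consH]

theorem splitOn_nl (l : List Char) : PySem.Chars.splitOn l ['\n'] = nlSegs l := by
  rw [PySem.Chars.splitOn, splitOn_go_nl (l.length + 1) l [] [] (by omega)]
  simp [consH'_nil_of_ne _ (nlSegs_ne_nil l)]

-- ---- raw segmentation on the five clause delimiters ----
def delims : List Char := ['.', '!', '?', ';', '\n']

def rawSegs : List Char → List (List Char)
  | [] => [[]]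
  | c :: r => if delims.contains c then [] :: rawSegs r else consH c (rawSegs r)

theorem rawSegs_ne_nil (l : List Char) : rawSegs l ≠ [] := by
  cases l with
  | nil => simp [rawSegs]
  | cons c r =>
    rw [rawSegs]
    split
    · simp
    · cases h : rawSegs r with
      | nil => simp [consH]
      | cons s ss => simp [consH]

theorem rawSegs_subset (l : List Char) : ∀ g ∈ rawSegs l, ∀ c ∈ g, c ∈ l := by
  induction l with
  | nil => intro g hg c hc; simp [rawSegs] at hg; subst hg; simp at hc
  | cons a r ih =>
    intro g hg c hc
    rw [rawSegs] at hg
    by_cases hd : delims.contains a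
    · rw [if_pos hd] at hg
      rcases List.mem_cons.mp hg with hg | hg
      · subst hg; simp at hc
      · exact List.mem_cons_of_mem a (ih g hg c hc)
    · rw [if_neg hd] at hg
      cases hraw : rawSegs r with
      | nil => exact absurd hraw (rawSegs_ne_nil r)
      | cons s ss =>
        rw [hraw] at hg
        rw [consH] at hg
        rcases List.mem_cons.mp hg with hg | hg
        · subst hg
          rcases List.mem_cons.mp hc with h | h
          · exact h ▸ List.mem_cons_self
          · exact List.mem_cons_of_mem a (ih s (by simp [hraw]) c h)
        · exact List.mem_cons_of_mem a (ih g (by simp [hraw, hg]) c hc)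

def toNl (c : Char) : Char := if c ∈ ['.', '!', '?', ';'] then '\n' else c

theorem nlSegs_map_toNl (l : List Char) : nlSegs (l.map toNl) = rawSegs l := by
  induction l with
  | nil => rfl
  | cons c r ih =>
    rw [List.map_cons, nlSegs, rawSegs]
    by_cases hd : delims.contains c
    · have h1 : toNl c = '\n' := by
        simp [delims] at hd
        rcases hd with h | h | h | h | h <;> subst h <;> rfl
      rw [if_pos hd, h1, if_pos rfl, ih]
    · have hmem : c ∉ ['.', '!', '?', ';'] := by
        simp [delims] at hd
        simp
        tauto
      have h1 : toNl c = c := by simp [toNl, hmem]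
      have hcn : ¬ (c = '\n') := by
        intro h; subst h; simp [delims] at hd
      rw [if_neg hd, h1, if_neg hcn, ih]

-- ---- A's state machine produces exactly the per-segment clauses ----
def emitA (g : List Char) : List String :=
  let clause := normalize_text_py (PySem.Str.stripChars (String.ofList g) " -,/\t\r\n")
  if clause ≠ "" then [clause] else []

def segsFrom : List Char → List Char → List (List Char)
  | cur, [] => [cur]
  | cur, c :: r => if delims.contains c then cur :: segsFrom [] r else segsFrom (cur ++ [spC c]) r

theorem foldA (cs : List Char) : ∀ out cur,
    (cs.foldl split_clauses_step (out, cur)).1 ++ emitA (cs.foldl split_clauses_step (out, cur)).2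
      = out ++ (segsFrom cur cs).flatMap emitA := by
  induction cs with
  | nil => intro out cur; simp [segsFrom]
  | cons c r ih =>
    intro out cur
    rw [List.foldl_cons, segsFrom]
    have hde : (".!?;\n".toList).contains c = delims.contains c := rfl
    by_cases hd : delims.contains c
    · rw [show split_clauses_step (out, cur) c
          = (out ++ emitA cur, []) by
        simp only [split_clauses_step, hde, hd, if_pos, emitA]
        split <;> simp_all]
      rw [ih (out ++ emitA cur) [], if_pos hd]
      simp
    · rw [show split_clauses_step (out, cur) c = (out, cur ++ [spC c]) by
        simp only [split_clauses_step, hde, hd, if_neg, spC]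
        rfl]
      rw [ih out (cur ++ [spC c]), if_neg hd]

theorem segsFrom_eq (cs : List Char) : ∀ cur,
    segsFrom cur cs = consH' cur ((rawSegs cs).map (List.map spC)) := by
  induction cs with
  | nil => intro cur; simp [segsFrom, rawSegs, consH']
  | cons c r ih =>
    intro cur
    rw [segsFrom, rawSegs]
    by_cases hd : delims.contains c
    · rw [if_pos hd, if_pos hd, ih []]
      rw [List.map_cons]
      have hnn : (rawSegs r).map (List.map spC) ≠ [] := by
        simp [rawSegs_ne_nil r]
      rw [consH'_nil_of_ne _ hnn]
      simp [consH']
    · rw [if_neg hd, if_neg hd, ih (cur ++ [spC c])]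
      have hmap : ((consH c (rawSegs r)).map (List.map spC))
          = consH (spC c) ((rawSegs r).map (List.map spC)) := by
        cases rawSegs r <;> simp [consH]
      rw [hmap, consH'_consH]

-- ---- clause computation: A's (normalize ∘ strip ∘ spC-map) = B's (join ∘ split₀ ∘ strip) ----
def clauseBC (g : List Char) : List Char :=
  PySem.Chars.join [' '] (PySem.Chars.split₀ (PySem.Chars.stripChars g stripset))

theorem clauseA_eq_clauseBC (g : List Char) (hd : ∀ c ∈ g, pvDomChar c = true) :
    PySem.Chars.strip (PySem.Chars.join [' ']
        (PySem.Chars.split₀ (PySem.Chars.stripChars (g.map spC) stripset)))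
      = clauseBC g := by
  rw [stripChars_map_spC g hd, split₀_eq_Hs, Hs_map_spC, ← split₀_eq_Hs]
  exact strip_join_good _ (good_split₀ _)

theorem clauseBC_idem (g : List Char) :
    PySem.Chars.strip (PySem.Chars.join [' '] (PySem.Chars.split₀ (clauseBC g))) = clauseBC g := by
  unfold clauseBC
  rw [split₀_eq_Hs (PySem.Chars.join [' '] _),
    Hs_join _ (good_split₀ (PySem.Chars.stripChars g stripset))]
  exact strip_join_good _ (good_split₀ _)

-- string-level bridges
theorem toList_normalize (s : String) : (normalize_text_py s).toList
    = PySem.Chars.strip (PySem.Chars.join [' '] (PySem.Chars.split₀ s.toList)) := by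
  simp [normalize_text_py, PySem.Str.strip, PySem.Str.join, PySem.Str.split₀,
    Function.comp_def, String.toList_ofList]

theorem toList_strB (seg : String) :
    (PySem.Str.join " " (PySem.Str.split₀ (PySem.Str.stripChars seg " -,/\t\r\n"))).toList
      = clauseBC seg.toList := by
  simp [PySem.Str.join, PySem.Str.split₀, PySem.Str.stripChars, clauseBC,
    Function.comp_def, String.toList_ofList]
  rfl

def emitBs (seg : String) : List String :=
  let clause := PySem.Str.join " " (PySem.Str.split₀ (PySem.Str.stripChars seg " -,/\t\r\n"))
  if clause = "" then [] else [clause]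

theorem emitA_map_spC (g : List Char) (hd : ∀ c ∈ g, pvDomChar c = true) :
    emitA (g.map spC) = emitBs (String.ofList g) := by
  have hstr : normalize_text_py (PySem.Str.stripChars (String.ofList (g.map spC)) " -,/\t\r\n")
      = PySem.Str.join " " (PySem.Str.split₀ (PySem.Str.stripChars (String.ofList g) " -,/\t\r\n")) := by
    apply String.toList_inj.mp
    rw [toList_normalize, toList_strB]
    simp [PySem.Str.stripChars, String.toList_ofList]
    exact clauseA_eq_clauseBC g hd
  unfold emitA emitBs
  rw [hstr]
  by_cases hc : (PySem.Str.join " " (PySem.Str.split₀ (PySem.Str.stripChars (String.ofList g) " -,/\t\r\n"))) = ""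
  · simp [hc]
  · simp [hc]

theorem emitBs_normalized (seg : String) (x : String) (hx : x ∈ emitBs seg) :
    normalize_text_py x = x ∧ x ≠ "" := by
  unfold emitBs at hx
  by_cases hc : (PySem.Str.join " " (PySem.Str.split₀ (PySem.Str.stripChars seg " -,/\t\r\n"))) = ""
  · simp [hc] at hx
  · simp [hc] at hx
    subst hx
    refine ⟨?_, hc⟩
    apply String.toList_inj.mp
    rw [toList_normalize, toList_strB]
    exact clauseBC_idem seg.toList

-- ---- classification & dedupe fusion ----
def pMark (clause : String) : Bool :=
  markers_py.any (fun m => PySem.Str.isIn m (PySem.Str.lower clause))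

theorem classify_fold (L : List String) : ∀ (a b : List String),
    L.foldl
      (fun (st : List String × List String) clause =>
        let lowered := PySem.Str.lower clause
        if markers_py.any (fun m => PySem.Str.isIn m lowered) then
          (st.1, st.2 ++ [clause])
        else
          (st.1 ++ [clause], st.2))
      (a, b)
    = (a ++ L.filter (fun x => !pMark x), b ++ L.filter pMark) := by
  induction L with
  | nil => intro a b; simp
  | cons x r ih =>
    intro a b
    rw [List.foldl_cons]
    by_cases hp : pMark x
    · have hm : (markers_py.any (fun m => PySem.Str.isIn m (PySem.Str.lower x))) = true := hp
      simp only [hm, if_pos]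
      rw [ih a (b ++ [x])]
      simp [hp]
    · have hm : (markers_py.any (fun m => PySem.Str.isIn m (PySem.Str.lower x))) = false := by
        simpa [pMark] using hp
      simp only [hm]
      rw [if_neg (by simp), ih (a ++ [x]) b]
      simp [hp]

def dd : List String → List String → PySem.Set String → List String
  | [], out, _ => out
  | x :: r, out, seen =>
    if PySem.Set.contains seen (PySem.Str.lower x) then dd r out seen
    else dd r (out ++ [x]) (PySem.Set.add seen (PySem.Str.lower x))

def ddS : List String → PySem.Set String → PySem.Set String
  | [], seen => seen
  | x :: r, seen =>
    if PySem.Set.contains seen (PySem.Str.lower x) then ddS r seen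
    else ddS r (PySem.Set.add seen (PySem.Str.lower x))

theorem dedupe_eq_dd (L : List String) : ∀ out seen,
    (∀ x ∈ L, normalize_text_py x = x ∧ x ≠ "") →
    (L.foldl
      (fun (st : List String × PySem.Set String) item =>
        let text := normalize_text_py item
        let key := PySem.Str.lower text
        if text = "" ∨ PySem.Set.contains st.2 key then st
        else (st.1 ++ [text], PySem.Set.add st.2 key))
      (out, seen)).1 = dd L out seen := by
  induction L with
  | nil => intro out seen _; simp [dd]
  | cons x r ih =>
    intro out seen h
    rcases h x (by simp) with ⟨hn, hne⟩
    rw [List.foldl_cons, dd]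
    simp only [hn]
    by_cases hc : PySem.Set.contains seen (PySem.Str.lower x)
    · rw [if_pos (Or.inr hc), if_pos hc]
      exact ih out seen (fun y hy => h y (by simp [hy]))
    · rw [if_neg (by
        simp [hne]
        exact fun hm => hc (by simpa using hm)), if_neg hc]
      exact ih (out ++ [x]) (PySem.Set.add seen (PySem.Str.lower x))
        (fun y hy => h y (by simp [hy]))

def bstep (st : List String × List String × PySem.Set String × PySem.Set String)
    (clause : String) : List String × List String × PySem.Set String × PySem.Set String :=
  let key := PySem.Str.lower clause
  if pMark clause then
    if PySem.Set.contains st.2.2.2 key then st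
    else (st.1, st.2.1 ++ [clause], st.2.2.1, PySem.Set.add st.2.2.2 key)
  else
    if PySem.Set.contains st.2.2.1 key then st
    else (st.1 ++ [clause], st.2.1, PySem.Set.add st.2.2.1 key, st.2.2.2)

theorem step_alt_eq (st : List String × List String × PySem.Set String × PySem.Set String)
    (seg : String) : classify_step_alt st seg = (emitBs seg).foldl bstep st := by
  unfold classify_step_alt emitBs
  by_cases hc : (PySem.Str.join " " (PySem.Str.split₀ (PySem.Str.stripChars seg " -,/\t\r\n"))) = ""
  · simp [hc]
  · simp only [hc, if_neg, if_false, List.foldl_cons, List.foldl_nil]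
    rw [show markers_py_alt = markers_py from rfl]
    rfl

theorem fold_step_alt (segs : List String) :
    ∀ st, segs.foldl classify_step_alt st = (segs.flatMap emitBs).foldl bstep st := by
  induction segs with
  | nil => intro st; simp
  | cons seg r ih =>
    intro st
    rw [List.foldl_cons, List.flatMap_cons, List.foldl_append, step_alt_eq, ih]

theorem fused_fold (L : List String) :
    ∀ (conf den : List String) (sC sD : PySem.Set String),
    L.foldl bstep (conf, den, sC, sD)
    = (dd (L.filter (fun x => !pMark x)) conf sC, dd (L.filter pMark) den sD,
       ddS (L.filter (fun x => !pMark x)) sC, ddS (L.filter pMark) sD) := by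
  induction L with
  | nil => intro conf den sC sD; simp [dd, ddS]
  | cons x r ih =>
    intro conf den sC sD
    rw [List.foldl_cons]
    by_cases hp : pMark x
    · have hf1 : (x :: r).filter (fun x => !pMark x) = r.filter (fun x => !pMark x) := by
        simp [hp]
      have hf2 : (x :: r).filter pMark = x :: r.filter pMark := by simp [hp]
      rw [hf1, hf2, dd, ddS]
      by_cases hc : PySem.Set.contains sD (PySem.Str.lower x)
      · rw [show bstep (conf, den, sC, sD) x = (conf, den, sC, sD) by
          unfold bstep
          simp [hp]
          simpa using hc, if_pos hc, if_pos hc, ih]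
      · rw [show bstep (conf, den, sC, sD) x
            = (conf, den ++ [x], sC, PySem.Set.add sD (PySem.Str.lower x)) by
          unfold bstep
          simp [hp]
          intro h
          exact absurd (by simpa using h) hc, if_neg hc, if_neg hc, ih]
    · have hf1 : (x :: r).filter (fun x => !pMark x) = x :: r.filter (fun x => !pMark x) := by
        simp [hp]
      have hf2 : (x :: r).filter pMark = r.filter pMark := by simp [hp]
      rw [hf1, hf2, dd, ddS]
      by_cases hc : PySem.Set.contains sC (PySem.Str.lower x)
      · rw [show bstep (conf, den, sC, sD) x = (conf, den, sC, sD) by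
          unfold bstep
          simp [hp]
          simpa using hc, if_pos hc, if_pos hc, ih]
      · rw [show bstep (conf, den, sC, sD) x
            = (conf ++ [x], den, PySem.Set.add sC (PySem.Str.lower x), sD) by
          unfold bstep
          simp [hp]
          intro h
          exact absurd (by simpa using h) hc, if_neg hc, if_neg hc, ih]

-- ---- B's preprocessing: replace + split = rawSegs ----
theorem replace_fold_toList (text : String) :
    ((".!?;".toList).foldl
      (fun s d => PySem.Str.replace s (String.ofList [d]) "\n") text).toList
      = text.toList.map toNl := by
  have hstep : ∀ (s : String) (d : Char),
      (PySem.Str.replace s (String.ofList [d]) "\n").toList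
        = s.toList.map (fun c => if c = d then '\n' else c) := by
    intro s d
    simp [PySem.Str.replace, String.toList_ofList]
    exact replace_single d '\n' s.toList
  rw [show (".!?;".toList) = ['.', '!', '?', ';'] from rfl]
  simp only [List.foldl_cons, List.foldl_nil]
  rw [hstep, hstep, hstep, hstep]
  simp only [List.map_map]
  apply List.map_congr_left
  intro c _
  simp only [Function.comp_def, toNl]
  by_cases h1 : c = '.' <;> by_cases h2 : c = '!' <;> by_cases h3 : c = '?' <;>
    by_cases h4 : c = ';' <;> simp_all <;> decide

-- ---- main assembly ----
theorem flatMap_congr_mem {α β : Type} (l : List α) (f g : α → List β)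
    (h : ∀ x ∈ l, f x = g x) : l.flatMap f = l.flatMap g := by
  induction l with
  | nil => rfl
  | cons a r ih =>
    rw [List.flatMap_cons, List.flatMap_cons, h a (by simp),
      ih (fun x hx => h x (by simp [hx]))]

theorem split_clauses_eq_L (text : String) (hd : ∀ c ∈ text.toList, pvDomChar c = true) :
    split_clauses_py text
      = (rawSegs text.toList).flatMap (fun g => emitBs (String.ofList g)) := by
  have h1 : split_clauses_py text = (segsFrom [] text.toList).flatMap emitA := by
    unfold split_clauses_py
    have := foldA text.toList [] []
    simp only [List.nil_append] at this
    rw [← this]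
    by_cases hc : normalize_text_py (PySem.Str.stripChars
        (String.ofList (List.foldl split_clauses_step ([], []) text.toList).2) " -,/\t\r\n") = ""
    · simp only [emitA]
      simp [hc]
    · simp only [emitA]
      simp [hc]
  rw [h1, segsFrom_eq, consH'_nil_of_ne _ (by simp [rawSegs_ne_nil]), List.flatMap_map]
  apply flatMap_congr_mem
  intro g hg
  exact emitA_map_spC g (fun c hc => hd c (rawSegs_subset text.toList g hg c hc))

theorem L_normalized (text : String) (x : String)
    (hx : x ∈ (rawSegs text.toList).flatMap (fun g => emitBs (String.ofList g))) :
    normalize_text_py x = x ∧ x ≠ "" := by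
  rcases List.mem_flatMap.mp hx with ⟨g, _, hxg⟩
  exact emitBs_normalized (String.ofList g) x hxg

set_option maxHeartbeats 1000000 in
theorem main_eq (text : String) (hd : ∀ c ∈ text.toList, pvDomChar c = true) :
    classify_clauses_py text = classify_clauses_py_alt text := by
  have hprops : ∀ x ∈ (rawSegs text.toList).flatMap (fun g => emitBs (String.ofList g)),
      normalize_text_py x = x ∧ x ≠ "" := fun x hx => L_normalized text x hx
  -- A's side reduces to dd over the filtered clause list
  have hA : classify_clauses_py text
      = (dd (((rawSegs text.toList).flatMap (fun g => emitBs (String.ofList g))).filter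
            (fun x => !pMark x)) [] PySem.Set.empty,
         dd (((rawSegs text.toList).flatMap (fun g => emitBs (String.ofList g))).filter
            pMark) [] PySem.Set.empty) := by
    unfold classify_clauses_py
    rw [split_clauses_eq_L text hd, classify_fold _ [] []]
    simp only [List.nil_append]
    unfold dedupe_texts_py
    rw [dedupe_eq_dd _ [] _ (fun x hx => hprops x (List.mem_filter.mp hx).1),
      dedupe_eq_dd _ [] _ (fun x hx => hprops x (List.mem_filter.mp hx).1)]
  -- B's side reduces to the same
  have hB : classify_clauses_py_alt text
      = (dd (((rawSegs text.toList).flatMap (fun g => emitBs (String.ofList g))).filter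
            (fun x => !pMark x)) [] PySem.Set.empty,
         dd (((rawSegs text.toList).flatMap (fun g => emitBs (String.ofList g))).filter
            pMark) [] PySem.Set.empty) := by
    unfold classify_clauses_py_alt
    have hseg : (PySem.Str.split? ((".!?;".toList).foldl
          (fun s d => PySem.Str.replace s (String.ofList [d]) "\n") text) "\n").getD []
        = (rawSegs text.toList).map String.ofList := by
      rw [PySem.Str.split?, PySem.Chars.split?]
      rw [show ("\n" : String).toList = ['\n'] from rfl]
      simp only [List.isEmpty_cons, if_false, Option.map_some, Option.getD_some,
        Bool.false_eq_true]
      rw [splitOn_nl, replace_fold_toList, nlSegs_map_toNl]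
    simp only [hseg]
    rw [fold_step_alt, List.flatMap_map, fused_fold]
  rw [hA, hB]

-- ===== VERDICT (by name: the statement is the Claim_ definition above) =====
theorem classify_clauses_py_spec : Claim_equal_classify_clauses_py := by
  intro text hdom
  unfold Spec_classify_clauses_py
  have hd : ∀ c ∈ text.toList, pvDomChar c = true := by
    unfold Dom_classify_clauses_py pvDomStr at hdom
    simpa [List.all_eq_true] using hdom
  exact main_eq text hd
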